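-- pv_equiv track=rewrite | github.com/zeitiempo/ner-on-web-txt | INLPE/INLPE/ps.py | mode3
-- ===== SOURCE A (Python) =====
-- def mode3(f_i):
--     output=''
--     context=f_i.split()
--     for line in context:
--         end=len(line.strip())-1
--         i=0
--         for char in line.strip():
--             if end==0:
--                 output=output+char+" S\n"
--             elif i==0:
--                 output=output+char+" B\n"
--             elif i==end:
--                 output=output+char+" E\n"
--             else:
--                 output=output+char+" M\n"
--             i=i+1
--     return output
-- ===== SOURCE B (Python) =====
-- def mode3(f_i):
--     lines = []
--     for w in f_i.split():
--         L = len(w)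
--         tags = ['S'] if L == 1 else ['B'] + ['M'] * (L - 2) + ['E']
--         for c, t in zip(w, tags):
--             lines.append(c + ' ' + t + '\n')
--     return ''.join(lines)
-- ===== Notes on version B (the rewrite author's own statement) =====
-- stated objective: faster
-- what changed: Instead of comparing each character's index against end inside the loop, B builds each token's BMES tag sequence structurally from its length (['S'] or ['B']+['M']*(L-2)+['E']), zips it with the characters, and joins the collected lines once.
import Mathlib
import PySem

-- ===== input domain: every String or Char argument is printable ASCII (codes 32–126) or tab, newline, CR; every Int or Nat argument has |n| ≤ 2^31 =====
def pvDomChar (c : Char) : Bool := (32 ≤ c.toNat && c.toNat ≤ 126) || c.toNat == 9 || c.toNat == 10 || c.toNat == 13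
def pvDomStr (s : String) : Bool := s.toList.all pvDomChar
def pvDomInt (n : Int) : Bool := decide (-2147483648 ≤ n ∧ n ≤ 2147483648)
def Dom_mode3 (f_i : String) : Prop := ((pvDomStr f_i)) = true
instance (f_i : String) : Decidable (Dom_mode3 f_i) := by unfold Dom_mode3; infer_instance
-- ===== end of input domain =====

-- B rebuilds each token's tag sequence from its length and zips it with the characters,
-- instead of A's per-character index comparison with quadratic string concatenation.

-- ===== PORT A =====
-- one step of A's inner 'for char in line.strip()' loop (state = (output, i))
def mode3Step (e : Int) (st : String × Int) (c : Char) : String × Int :=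
  if e = 0 then (st.1 ++ String.singleton c ++ " S\n", st.2 + 1)
  else if st.2 = 0 then (st.1 ++ String.singleton c ++ " B\n", st.2 + 1)
  else if st.2 = e then (st.1 ++ String.singleton c ++ " E\n", st.2 + 1)
  else (st.1 ++ String.singleton c ++ " M\n", st.2 + 1)

-- the body of A's outer 'for line in context' loop
def mode3Line (output : String) (line : String) : String :=
  ((PySem.Str.strip line).toList.foldl
    (mode3Step (((PySem.Str.strip line).toList.length : Int) - 1)) (output, 0)).1

def mode3 (f_i : String) : String :=
  (PySem.Str.split₀ f_i).foldl mode3Line ""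

-- ===== PORT B =====
def altTags (L : Nat) : List String :=
  if L = 1 then ["S"] else "B" :: (List.replicate (L - 2) "M" ++ ["E"])

def altWord (w : String) : List String :=
  List.zipWith (fun c t => String.singleton c ++ " " ++ t ++ "\n") w.toList (altTags w.toList.length)

def mode3_alt (f_i : String) : String :=
  String.join ((PySem.Str.split₀ f_i).flatMap altWord)

-- ===== PRECONDITION & SPEC =====
def Spec_mode3 (f_i : String) (out : String) : Prop := out = mode3_alt f_i
instance (f_i : String) (out : String) : Decidable (Spec_mode3 f_i out) := by unfold Spec_mode3; infer_instance

-- ===== CLAIM (what is proved, stated in full; the proofs are below) =====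
def Claim_equal_mode3 : Prop := ∀ (f_i : String), Dom_mode3 f_i → Spec_mode3 f_i (mode3 f_i)

-- ===== LEMMAS AND PROOFS =====

lemma str_join_nil : String.join ([] : List String) = "" := rfl

lemma str_push_append (s t : String) (c : Char) :
    s.push c ++ t = s ++ (String.singleton c ++ t) := by
  rw [String.push_eq_append, String.append_assoc]

lemma str_foldl_join (l : List String) (s : String) :
    List.foldl (· ++ ·) s l = s ++ String.join l := by
  induction l generalizing s with
  | nil => simp [String.join]
  | cons x xs ih => simp [String.join] at ih ⊢; rw [ih, ih x, String.append_assoc]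

lemma str_join_cons (x : String) (l : List String) :
    String.join (x :: l) = x ++ String.join l := by
  show List.foldl (· ++ ·) ("" ++ x) l = _
  rw [str_foldl_join]; simp

lemma str_join_append (a b : List String) :
    String.join (a ++ b) = String.join a ++ String.join b := by
  induction a with
  | nil => simp [String.join]
  | cons x xs ih => rw [List.cons_append, str_join_cons, str_join_cons, ih, String.append_assoc]

-- every word produced by split() contains no whitespace character
lemma split₀_go_no_space (s cur : List Char) (acc : List (List Char))
    (hcur : ∀ c ∈ cur, PySem.Chars.isspace c = false)
    (hacc : ∀ w ∈ acc, ∀ c ∈ w, PySem.Chars.isspace c = false) :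
    ∀ w ∈ PySem.Chars.split₀.go s cur acc, ∀ c ∈ w, PySem.Chars.isspace c = false := by
  induction s generalizing cur acc with
  | nil =>
    intro w hw
    unfold PySem.Chars.split₀.go at hw
    split at hw
    · exact hacc w (List.mem_reverse.mp hw)
    · rcases List.mem_cons.mp (List.mem_reverse.mp hw) with h | h
      · subst h; intro c hc; exact hcur c (List.mem_reverse.mp hc)
      · exact hacc w h
  | cons a s ih =>
    intro w hw
    unfold PySem.Chars.split₀.go at hw
    by_cases hsp : PySem.Chars.isspace a = true
    · simp only [hsp, if_true] at hw
      split at hw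
      · exact ih [] acc (by simp) hacc w hw
      · refine ih [] (cur.reverse :: acc) (by simp) ?_ w hw
        intro w' hw'
        rcases List.mem_cons.mp hw' with h | h
        · subst h; intro c hc; exact hcur c (List.mem_reverse.mp hc)
        · exact hacc w' h
    · simp only [hsp] at hw
      refine ih (a :: cur) acc ?_ hacc w hw
      intro c hc
      rcases List.mem_cons.mp hc with h | h
      · rw [h]; simpa using hsp
      · exact hcur c h

lemma split₀_no_space (s : List Char) :
    ∀ w ∈ PySem.Chars.split₀ s, ∀ c ∈ w, PySem.Chars.isspace c = false :=
  split₀_go_no_space s [] [] (by simp) (by simp)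

lemma strip_of_no_space (w : List Char)
    (h : ∀ c ∈ w, PySem.Chars.isspace c = false) :
    PySem.Chars.strip w = w := by
  have hl : PySem.Chars.lstrip w = w := by
    unfold PySem.Chars.lstrip
    cases w with
    | nil => rfl
    | cons c cs => simp [h c (by simp)]
  have hr : PySem.Chars.rstrip w = w := by
    unfold PySem.Chars.rstrip
    have hdw : List.dropWhile PySem.Chars.isspace w.reverse = w.reverse := by
      cases hw : w.reverse with
      | nil => rfl
      | cons c cs =>
        have hc : PySem.Chars.isspace c = false := by
          apply h
          have : c ∈ w.reverse := by rw [hw]; simp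
          exact List.mem_reverse.mp this
        simp [hc]
    rw [hdw, List.reverse_reverse]
  unfold PySem.Chars.strip
  rw [hl, hr]

-- the join of B's per-character lines for the tail of a word (all 'M's then an 'E')
lemma innerA_tail (cs : List Char) (i : Int) (hi : 1 ≤ i) (hcs : cs ≠ []) (out : String)
    (e : Int) (he : e = i + cs.length - 1) :
    (cs.foldl (mode3Step e) (out, i)).1 =
      out ++ String.join (List.zipWith (fun c t => String.singleton c ++ " " ++ t ++ "\n")
        cs (List.replicate (cs.length - 1) "M" ++ ["E"])) := by
  induction cs generalizing i out with
  | nil => exact absurd rfl hcs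
  | cons c rest ih =>
    cases rest with
    | nil =>
      have he' : e = i := by simp only [List.length_cons, List.length_nil] at he; push_cast at he; omega
      have h0 : ¬ e = 0 := by omega
      have hi0 : ¬ i = 0 := by omega
      simp [mode3Step, hi0, he', str_join_cons, str_join_nil, str_push_append, String.append_assoc]
    | cons c' rest' =>
      have h0 : ¬ e = 0 := by simp only [List.length_cons] at he; push_cast at he; omega
      have hi0 : ¬ i = 0 := by omega
      have hie : ¬ i = e := by simp only [List.length_cons] at he; push_cast at he; omega
      have step : mode3Step e (out, i) c = (out ++ String.singleton c ++ " M\n", i + 1) := by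
        simp [mode3Step, h0, hi0, hie]
      have hrep : (c' :: rest').length - 1 + 1 = (c :: c' :: rest').length - 1 := by simp
      calc ((c :: c' :: rest').foldl (mode3Step e) (out, i)).1
          = ((c' :: rest').foldl (mode3Step e) (out ++ String.singleton c ++ " M\n", i + 1)).1 := by
            rw [List.foldl_cons, step]
        _ = (out ++ String.singleton c ++ " M\n") ++
              String.join (List.zipWith (fun c t => String.singleton c ++ " " ++ t ++ "\n")
                (c' :: rest') (List.replicate ((c' :: rest').length - 1) "M" ++ ["E"])) := by
            refine ih (i + 1) (by omega) (by simp) _ ?_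
            simp only [List.length_cons] at he ⊢; push_cast at he ⊢; omega
        _ = _ := by
            rw [← hrep, List.replicate_succ]
            simp [List.zipWith_cons_cons, str_join_cons, str_push_append, String.append_assoc]

-- A's inner loop over one whitespace-free word equals out ++ join of B's lines for it
lemma innerA_word (w : List Char) (out : String) :
    (w.foldl (mode3Step ((w.length : Int) - 1)) (out, 0)).1 =
      out ++ String.join (List.zipWith (fun c t => String.singleton c ++ " " ++ t ++ "\n")
        w (altTags w.length)) := by
  cases w with
  | nil => simp [altTags, String.join]
  | cons c rest =>
    cases rest with
    | nil => simp [mode3Step, altTags, str_join_cons, str_join_nil, str_push_append, String.append_assoc]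
    | cons c' rest' =>
      have hlen : ¬ ((c :: c' :: rest').length : Int) - 1 = 0 := by
        simp only [List.length_cons]; push_cast; omega
      have step : mode3Step (((c :: c' :: rest').length : Int) - 1) (out, 0) c =
          (out ++ String.singleton c ++ " B\n", 1) := by
        unfold mode3Step
        rw [if_neg hlen]
        simp
      have htail := innerA_tail (c' :: rest') 1 le_rfl (by simp)
        (out ++ String.singleton c ++ " B\n") (((c :: c' :: rest').length : Int) - 1)
        (by simp only [List.length_cons]; push_cast; omega)
      have hne : ¬ (c :: c' :: rest').length = 1 := by simp
      rw [List.foldl_cons, step, htail]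
      have hrep : (c' :: rest').length - 1 = (c :: c' :: rest').length - 2 := by simp
      simp only [altTags, hne, if_false, hrep]
      simp only [List.zipWith_cons_cons, str_join_cons]
      simp [str_push_append, String.append_assoc]

lemma outer_fold (ws : List String) (out : String)
    (h : ∀ w ∈ ws, PySem.Chars.strip w.toList = w.toList) :
    ws.foldl mode3Line out = out ++ String.join (ws.flatMap altWord) := by
  induction ws generalizing out with
  | nil => simp [String.join]
  | cons w ws ih =>
    have hw : PySem.Chars.strip w.toList = w.toList := h w (by simp)
    have hline : mode3Line out w =
        out ++ String.join (altWord w) := by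
      unfold mode3Line
      have hs : (PySem.Str.strip w).toList = w.toList := by
        simp [PySem.Str.strip, hw]
      rw [hs]
      exact innerA_word w.toList out
    rw [List.foldl_cons, hline, ih _ (fun w' hw' => h w' (by simp [hw']))]
    rw [List.flatMap_cons, str_join_append, String.append_assoc]

-- ===== VERDICT (by name: the statement is the Claim_ definition above) =====
theorem mode3_spec : Claim_equal_mode3 := by
  intro f_i _
  unfold Spec_mode3 mode3 mode3_alt
  have h : ∀ w ∈ PySem.Str.split₀ f_i, PySem.Chars.strip w.toList = w.toList := by
    intro w hw
    unfold PySem.Str.split₀ at hw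
    rcases List.mem_map.mp hw with ⟨l, hl, rfl⟩
    have : (String.ofList l).toList = l := by simp
    rw [this]
    exact strip_of_no_space l (split₀_no_space f_i.toList l hl)
  simpa using outer_fold (PySem.Str.split₀ f_i) "" h
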